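-- pv_equiv track=rewrite | github.com/Exclamation1/Covering-Code | matrix_method_cover.py | all_sums_up_to_r
-- ===== SOURCE A (Python) =====
-- from itertools import combinations
--
-- def all_sums_up_to_r(cols, r):
--     """Return set of XOR sums of choosing 1..r distinct columns (non-empty)."""
--     S = set()
--     for k in range(1, r+1):
--         for subset in combinations(cols, k):
--             x = 0
--             for c in subset: x ^= c
--             S.add(x)
--     return S
-- ===== SOURCE B (Python) =====
-- def all_sums_up_to_r(cols, r):
--     """Return set of XOR sums of choosing 1..r distinct columns (non-empty)."""
--     rn = max(r, 0)
--     # dp[j] = set of XOR sums of exactly j distinct columns among those processed so far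
--     dp = [{0}] + [set() for _ in range(rn)]
--     for c in cols:
--         dp = [dp[0]] + [dp[j] | {x ^ c for x in dp[j - 1]} for j in range(1, rn + 1)]
--     out = set()
--     for j in range(1, rn + 1):
--         out |= dp[j]
--     return out
-- ===== Notes on version B (the rewrite author's own statement) =====
-- stated objective: alternative
-- what changed: Replaced the enumeration of all C(n,k) subsets for every k<=r by a dynamic program over columns that keeps, for each count j<=r, only the set of reachable XOR values, unioning dp[j] with dp[j-1]^c per column; this dedups during the computation instead of only at the end.
import Mathlib
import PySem

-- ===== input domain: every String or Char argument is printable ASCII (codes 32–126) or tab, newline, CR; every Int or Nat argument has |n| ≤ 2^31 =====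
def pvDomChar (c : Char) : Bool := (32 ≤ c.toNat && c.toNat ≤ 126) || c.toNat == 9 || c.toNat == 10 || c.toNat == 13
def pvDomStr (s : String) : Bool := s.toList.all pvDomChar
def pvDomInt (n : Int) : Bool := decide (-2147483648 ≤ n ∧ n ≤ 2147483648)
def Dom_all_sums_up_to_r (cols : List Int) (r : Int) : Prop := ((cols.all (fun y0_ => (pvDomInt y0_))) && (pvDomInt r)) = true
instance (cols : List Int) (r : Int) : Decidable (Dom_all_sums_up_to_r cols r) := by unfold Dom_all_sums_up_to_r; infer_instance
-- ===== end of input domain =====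

-- B replaces A's per-k enumeration of all C(n,k) subsets by a column DP of reachable-XOR sets (alternative
-- algorithm, dedups during the computation); Python returns a set (unordered), so both ports return its
-- elements as the canonical sorted list of the distinct values.

-- ===== PORT A =====
-- itertools.combinations(cols, k) yields exactly the length-k sublists of cols (List.sublistsLen);
-- they are only inserted into a set whose elements are finally sorted, so enumeration order is immaterial.
def all_sums_up_to_r (cols : List Int) (r : Int) : List Int :=
  let S : PySem.Set Int :=
    (PySem.List.pyRange 1 (r + 1) 1).foldl (fun S k =>
      (List.sublistsLen k.toNat cols).foldl
        (fun S subset => PySem.Set.add S (subset.foldl (fun x c => PySem.Int.bxor x c) 0)) S)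
      PySem.Set.empty
  PySem.List.sorted S (fun x => x) false

-- ===== PORT B =====
-- one column step: dp' = [dp[0]] ++ [dp[j] | {x ^ c for x in dp[j-1]} for j = 1..rn]
def altStep (c : Int) (dp : List (List Int)) : List (List Int) :=
  match dp with
  | [] => []
  | d0 :: rest =>
      d0 :: List.zipWith (fun d prev => PySem.Set.union d (prev.map (fun x => PySem.Int.bxor x c))) rest (d0 :: rest)

def all_sums_up_to_r_alt (cols : List Int) (r : Int) : List Int :=
  let dp0 : List (List Int) := [(0 : Int)] :: List.replicate r.toNat []
  let dp := cols.foldl (fun dp c => altStep c dp) dp0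
  let out := dp.tail.foldl (fun S d => PySem.Set.union S d) PySem.Set.empty
  PySem.List.sorted out (fun x => x) false

-- ===== PRECONDITION & SPEC =====
def Spec_all_sums_up_to_r (cols : List Int) (r : Int) (out : List Int) : Prop := out = all_sums_up_to_r_alt cols r
instance (cols : List Int) (r : Int) (out : List Int) : Decidable (Spec_all_sums_up_to_r cols r out) := by unfold Spec_all_sums_up_to_r; infer_instance

-- ===== CLAIM (what is proved, stated in full; the proofs are below) =====
def Claim_equal_all_sums_up_to_r : Prop := ∀ (cols : List Int) (r : Int), Dom_all_sums_up_to_r cols r → Spec_all_sums_up_to_r cols r (all_sums_up_to_r cols r)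

-- ===== LEMMAS AND PROOFS =====

-- the XOR sum both Pythons compute over a chosen subset
def xorF (s : List Int) : Int := s.foldl (fun x c => PySem.Int.bxor x c) 0

theorem xorF_concat (t : List Int) (c : Int) : xorF (t ++ [c]) = PySem.Int.bxor (xorF t) c := by
  simp [xorF, List.foldl_append]

theorem sublist_concat_iff (s p : List Int) (c : Int) :
    s.Sublist (p ++ [c]) ↔ s.Sublist p ∨ ∃ t, t.Sublist p ∧ s = t ++ [c] := by
  rw [List.sublist_append_iff]
  constructor
  · rintro ⟨l1, l2, rfl, h1, h2⟩
    rcases List.sublist_singleton.mp h2 with rfl | rfl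
    · exact Or.inl (by simpa using h1)
    · exact Or.inr ⟨l1, h1, rfl⟩
  · rintro (h | ⟨t, ht, rfl⟩)
    · exact ⟨s, [], by simp, h, List.nil_sublist _⟩
    · exact ⟨t, [c], rfl, ht, List.Sublist.refl _⟩

-- membership / nodup of an iterated Set.update (A's outer loop) and Set.union (B's final loop)
theorem mem_foldl_update (f : Int → List Int) (ks : List Int) (S0 : List Int) (x : Int) :
    x ∈ ks.foldl (fun S k => PySem.Set.update S (f k)) S0 ↔ x ∈ S0 ∨ ∃ k ∈ ks, x ∈ f k := by
  induction ks generalizing S0 with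
  | nil => simp
  | cons k ks ih => simp [ih, PySem.Set.mem_update]; tauto

theorem nodup_foldl_update (f : Int → List Int) (ks : List Int) (S0 : List Int) (h : S0.Nodup) :
    (ks.foldl (fun S k => PySem.Set.update S (f k)) S0).Nodup := by
  induction ks generalizing S0 with
  | nil => exact h
  | cons k ks ih => exact ih _ (PySem.Set.nodup_update _ _ h)

theorem mem_foldl_union (ds : List (List Int)) (S0 : List Int) (x : Int) :
    x ∈ ds.foldl (fun S d => PySem.Set.union S d) S0 ↔ x ∈ S0 ∨ ∃ d ∈ ds, x ∈ d := by
  induction ds generalizing S0 with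
  | nil => simp
  | cons d ds ih => simp [ih, PySem.Set.mem_union]; tauto

theorem nodup_foldl_union (ds : List (List Int)) (S0 : List Int) (h : S0.Nodup) :
    (ds.foldl (fun S d => PySem.Set.union S d) S0).Nodup := by
  induction ds generalizing S0 with
  | nil => exact h
  | cons d ds ih => exact ih _ (PySem.Set.nodup_union _ _ h)

-- ===== A-side characterisation =====
theorem memA (cols : List Int) (r : Int) (x : Int) :
    x ∈ ((PySem.List.pyRange 1 (r + 1) 1).foldl (fun S k =>
        (List.sublistsLen k.toNat cols).foldl
          (fun S subset => PySem.Set.add S (subset.foldl (fun x c => PySem.Int.bxor x c) 0)) S)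
        PySem.Set.empty) ↔
      ∃ s, s.Sublist cols ∧ 1 ≤ s.length ∧ (s.length : Int) ≤ r ∧ xorF s = x := by
  have hrw : (fun (S : List Int) (k : Int) =>
      (List.sublistsLen k.toNat cols).foldl
        (fun S subset => PySem.Set.add S (subset.foldl (fun x c => PySem.Int.bxor x c) 0)) S)
      = fun S k => PySem.Set.update S ((List.sublistsLen k.toNat cols).map xorF) := by
    funext S k
    rw [PySem.Set.update_map_eq_foldl_add]
    rfl
  rw [hrw, mem_foldl_update]
  simp only [PySem.Set.empty, List.not_mem_nil, false_or, List.mem_map, List.mem_sublistsLen,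
    PySem.List.mem_pyRange_one]
  constructor
  · rintro ⟨k, ⟨hk1, hk2⟩, s, ⟨hs, hlen⟩, hx⟩
    exact ⟨s, hs, by omega, by omega, hx⟩
  · rintro ⟨s, hs, h1, h2, hx⟩
    exact ⟨(s.length : Int), ⟨by omega, by omega⟩, s, ⟨hs, by omega⟩, hx⟩

theorem nodupA (cols : List Int) (r : Int) :
    ((PySem.List.pyRange 1 (r + 1) 1).foldl (fun S k =>
        (List.sublistsLen k.toNat cols).foldl
          (fun S subset => PySem.Set.add S (subset.foldl (fun x c => PySem.Int.bxor x c) 0)) S)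
        PySem.Set.empty).Nodup := by
  have hrw : (fun (S : List Int) (k : Int) =>
      (List.sublistsLen k.toNat cols).foldl
        (fun S subset => PySem.Set.add S (subset.foldl (fun x c => PySem.Int.bxor x c) 0)) S)
      = fun S k => PySem.Set.update S ((List.sublistsLen k.toNat cols).map xorF) := by
    funext S k
    rw [PySem.Set.update_map_eq_foldl_add]
    rfl
  rw [hrw]
  exact nodup_foldl_update _ _ _ List.nodup_nil

-- ===== B-side invariant =====
def InvB (p : List Int) (dp : List (List Int)) : Prop :=
  ∀ j (h : j < dp.length), (dp[j]).Nodup ∧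
    ∀ x, x ∈ dp[j] ↔ ∃ s, s.Sublist p ∧ s.length = j ∧ xorF s = x

theorem altStep_length (c : Int) (dp : List (List Int)) : (altStep c dp).length = dp.length := by
  cases dp with
  | nil => simp [altStep]
  | cons d0 rest => simp [altStep]

theorem step_inv (c : Int) (p : List Int) (dp : List (List Int)) (h : InvB p dp) :
    InvB (p ++ [c]) (altStep c dp) := by
  cases dp with
  | nil => intro j hj; simp [altStep] at hj
  | cons d0 rest =>
    intro j hj
    rw [altStep_length] at hj
    match j with
    | 0 =>
      have h0 := h 0 (by simp)
      refine ⟨by simpa [altStep] using h0.1, fun x => ?_⟩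
      have hm := h0.2 x
      simp only [altStep, List.getElem_cons_zero] at hm ⊢
      rw [hm]
      constructor
      · rintro ⟨s, hs, hlen, hx⟩
        exact ⟨s, hs.trans (by simp), hlen, hx⟩
      · rintro ⟨s, hs, hlen, hx⟩
        rw [List.length_eq_zero_iff] at hlen
        subst hlen
        exact ⟨[], List.nil_sublist _, rfl, hx⟩
    | j + 1 =>
      have hj' : j < rest.length := by simpa using hj
      have hzw : (altStep c (d0 :: rest))[j + 1]'(by rw [altStep_length]; simpa using hj) =
          PySem.Set.union ((d0 :: rest)[j + 1]'(by simpa using hj))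
            (((d0 :: rest)[j]'(by simp; omega)).map (fun x => PySem.Int.bxor x c)) := by
        simp only [altStep, List.getElem_cons_succ]
        rw [List.getElem_zipWith]
      rw [hzw]
      have hprev := h j (by simp; omega)
      have hcur := h (j + 1) (by simpa using hj)
      refine ⟨PySem.Set.nodup_union _ _ hcur.1, fun x => ?_⟩
      rw [PySem.Set.mem_union]
      simp only [List.mem_map, hcur.2, hprev.2]
      constructor
      · rintro (⟨s, hs, hlen, hx⟩ | ⟨y, ⟨t, ht, hlen, hy⟩, hx⟩)
        · exact ⟨s, hs.trans (by simp), hlen, hx⟩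
        · exact ⟨t ++ [c], (sublist_concat_iff _ _ _).mpr (Or.inr ⟨t, ht, rfl⟩),
            by simp [hlen], by rw [xorF_concat, hy, hx]⟩
      · rintro ⟨s, hs, hlen, hx⟩
        rcases (sublist_concat_iff _ _ _).mp hs with hs' | ⟨t, ht, rfl⟩
        · exact Or.inl ⟨s, hs', hlen, hx⟩
        · refine Or.inr ⟨xorF t, ⟨t, ht, by simpa using hlen, rfl⟩, ?_⟩
          rw [← xorF_concat, hx]

theorem foldl_inv (cs : List Int) : ∀ (p : List Int) (dp : List (List Int)), InvB p dp →
    InvB (p ++ cs) (cs.foldl (fun dp c => altStep c dp) dp) := by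
  induction cs with
  | nil => intro p dp h; simpa using h
  | cons c cs ih =>
    intro p dp h
    have := ih (p ++ [c]) (altStep c dp) (step_inv c p dp h)
    simpa using this

theorem foldl_length (cs : List Int) : ∀ (dp : List (List Int)),
    (cs.foldl (fun dp c => altStep c dp) dp).length = dp.length := by
  induction cs with
  | nil => intro dp; rfl
  | cons c cs ih => intro dp; rw [List.foldl_cons, ih, altStep_length]

theorem init_inv (rn : Nat) : InvB [] ([(0 : Int)] :: List.replicate rn []) := by
  intro j hj
  match j with
  | 0 =>
    refine ⟨by simp, fun x => ?_⟩
    simp only [List.getElem_cons_zero, List.mem_singleton]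
    constructor
    · rintro rfl; exact ⟨[], List.nil_sublist _, rfl, rfl⟩
    · rintro ⟨s, hs, hlen, hx⟩
      rw [List.sublist_nil] at hs
      subst hs
      simpa [xorF] using hx.symm
  | j + 1 =>
    have hj' : j < rn := by simpa using hj
    have : ([(0 : Int)] :: List.replicate rn [])[j + 1]'(by simpa using hj) = ([] : List Int) := by
      simp
    rw [this]
    refine ⟨List.nodup_nil, fun x => ?_⟩
    simp only [List.not_mem_nil, false_iff]
    rintro ⟨s, hs, hlen, hx⟩
    rw [List.sublist_nil] at hs
    subst hs
    simp at hlen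

theorem memB (cols : List Int) (r : Int) (x : Int) :
    x ∈ ((cols.foldl (fun dp c => altStep c dp)
          ([(0 : Int)] :: List.replicate r.toNat [])).tail.foldl
        (fun S d => PySem.Set.union S d) PySem.Set.empty) ↔
      ∃ s, s.Sublist cols ∧ 1 ≤ s.length ∧ (s.length : Int) ≤ r ∧ xorF s = x := by
  have hinv : InvB cols (cols.foldl (fun dp c => altStep c dp)
      ([(0 : Int)] :: List.replicate r.toNat [])) := by
    simpa using foldl_inv cols [] _ (init_inv r.toNat)
  have hlen : (cols.foldl (fun dp c => altStep c dp)
      ([(0 : Int)] :: List.replicate r.toNat [])).length = r.toNat + 1 := by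
    rw [foldl_length]; simp
  set dp := cols.foldl (fun dp c => altStep c dp) ([(0 : Int)] :: List.replicate r.toNat []) with hdp
  rw [mem_foldl_union]
  simp only [PySem.Set.empty, List.not_mem_nil, false_or]
  constructor
  · rintro ⟨d, hd, hx⟩
    rcases List.mem_iff_getElem.mp hd with ⟨j, hjt, rfl⟩
    rw [List.getElem_tail] at hx
    have hj1 : j + 1 < dp.length := by
      have := hjt; rw [List.length_tail] at this; omega
    rcases (hinv (j + 1) hj1).2 x |>.mp hx with ⟨s, hs, hslen, hxor⟩
    have : j + 1 ≤ r.toNat := by omega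
    exact ⟨s, hs, by omega, by omega, hxor⟩
  · rintro ⟨s, hs, h1, h2, hx⟩
    have hjlt : s.length - 1 + 1 < dp.length := by rw [hlen]; omega
    refine ⟨dp[s.length - 1 + 1]'hjlt, ?_, ?_⟩
    · rw [List.mem_iff_getElem]
      refine ⟨s.length - 1, by rw [List.length_tail]; omega, ?_⟩
      rw [List.getElem_tail]
    · exact (hinv (s.length - 1 + 1) hjlt).2 x |>.mpr ⟨s, hs, by omega, hx⟩

theorem nodupB (cols : List Int) (r : Int) :
    ((cols.foldl (fun dp c => altStep c dp)
          ([(0 : Int)] :: List.replicate r.toNat [])).tail.foldl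
        (fun S d => PySem.Set.union S d) PySem.Set.empty).Nodup :=
  nodup_foldl_union _ _ List.nodup_nil

-- two Nodup lists with the same members have the same sorted list
theorem sorted_eq_of_mem_nodup (A B : List Int) (hA : A.Nodup) (hB : B.Nodup)
    (h : ∀ x, x ∈ A ↔ x ∈ B) :
    PySem.List.sorted A (fun x => x) false = PySem.List.sorted B (fun x => x) false := by
  apply PySem.List.sorted_eq_of_perm_of_pairwise_lt
  · exact (PySem.List.sorted_perm B (fun x => x) false).trans
      ((List.perm_ext_iff_of_nodup hB hA).mpr (fun a => (h a).symm))
  · have h1 := PySem.List.sorted_pairwise (xs := B) (key := fun x => x)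
    have h2 : (PySem.List.sorted B (fun x => x) false).Nodup :=
      ((PySem.List.sorted_perm B (fun x => x) false).symm).nodup hB
    exact (h1.and h2).imp (fun hab => lt_of_le_of_ne hab.1 hab.2)

-- ===== VERDICT (by name: the statement is the Claim_ definition above) =====
theorem all_sums_up_to_r_spec : Claim_equal_all_sums_up_to_r := by
  intro cols r _
  unfold Spec_all_sums_up_to_r all_sums_up_to_r all_sums_up_to_r_alt
  exact sorted_eq_of_mem_nodup _ _ (nodupA cols r) (nodupB cols r)
    (fun x => (memA cols r x).trans (memB cols r x).symm)
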